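-- pv_equiv track=rewrite | github.com/hirumaru/Ravel_Knit_Words | Ravelling & Knitting Words_uncommend.py | ravel
-- ===== SOURCE A (Python) =====
-- def ravel(q):
--     x=''
--     y=''
--     for i in q:
--         for j in range(len(i)):
--             x+=i
--             y+=x
--     return y
-- ===== SOURCE B (Python) =====
-- def ravel(q):
--     # idiomatic: each output chunk is the prefix q[:i+1], sliced directly,
--     # instead of maintaining accumulator strings in nested loops
--     return ''.join(q[:i + 1] for i in range(len(q)))
-- ===== Notes on version B (the rewrite author's own statement) =====
-- stated objective: idiomatic
-- what changed: B slices each prefix q[:i+1] directly and joins them in one pass, replacing A's nested loops with two growing accumulator strings.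
import Mathlib
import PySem

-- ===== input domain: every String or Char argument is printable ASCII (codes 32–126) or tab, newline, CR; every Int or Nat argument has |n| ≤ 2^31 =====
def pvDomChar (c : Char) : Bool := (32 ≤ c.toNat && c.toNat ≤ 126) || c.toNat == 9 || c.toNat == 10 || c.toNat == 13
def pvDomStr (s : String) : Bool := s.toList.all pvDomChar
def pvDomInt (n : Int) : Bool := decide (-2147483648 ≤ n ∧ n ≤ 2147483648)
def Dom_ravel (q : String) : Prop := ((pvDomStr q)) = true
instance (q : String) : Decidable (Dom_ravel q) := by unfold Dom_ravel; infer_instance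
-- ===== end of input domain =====

-- B joins directly-sliced prefixes q[:i+1] instead of A's nested loops over two accumulator strings (idiomatic; same result).

-- ===== PORT A =====
-- x='' ; y='' ; for i in q: for j in range(len(i)): x+=i ; y+=x ; return y
-- (iterating a string yields length-1 strings, so len(i) = 1 and the inner loop runs once)
def ravel (q : String) : String :=
  let st := q.toList.foldl
    (fun (st : List Char × List Char) i =>
      (PySem.List.pyRange 0 (PySem.Str.len (String.ofList [i])) 1).foldl
        (fun (st2 : List Char × List Char) _ =>
          let x := st2.1 ++ [i]
          (x, st2.2 ++ x)) st)
    ([], [])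
  String.ofList st.2

-- ===== PORT B =====
-- return ''.join(q[:i + 1] for i in range(len(q)))
def ravel_alt (q : String) : String :=
  String.ofList (((PySem.List.pyRange 0 (PySem.Str.len q) 1).map
    (fun i => PySem.List.slice q.toList none (some (i + 1)))).flatten)

-- ===== PRECONDITION & SPEC =====
def Spec_ravel (q : String) (out : String) : Prop := out = ravel_alt q
instance (q : String) (out : String) : Decidable (Spec_ravel q out) := by unfold Spec_ravel; infer_instance

-- ===== CLAIM (what is proved, stated in full; the proofs are below) =====
def Claim_equal_ravel : Prop := ∀ (q : String), Dom_ravel q → Spec_ravel q (ravel q)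

-- ===== LEMMAS AND PROOFS =====

-- the concatenation of the proper prefixes of l, each extended on the left by the context x
def prefCat : List Char → List Char → List Char
  | _, [] => []
  | x, c :: t => (x ++ [c]) ++ prefCat (x ++ [c]) t

theorem ravel_inner (st : List Char × List Char) (i : Char) :
    (PySem.List.pyRange 0 (PySem.Str.len (String.ofList [i])) 1).foldl
      (fun (st2 : List Char × List Char) _ =>
        let x := st2.1 ++ [i]
        (x, st2.2 ++ x)) st
    = (st.1 ++ [i], st.2 ++ (st.1 ++ [i])) := by
  have h : PySem.Str.len (String.ofList [i]) = 1 := by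
    simp [PySem.Str.len_eq]
  rw [h]
  rw [show PySem.List.pyRange 0 1 1 = [0] from by decide]
  rfl

theorem ravel_fold (l : List Char) (x y : List Char) :
    l.foldl
      (fun (st : List Char × List Char) i =>
        (PySem.List.pyRange 0 (PySem.Str.len (String.ofList [i])) 1).foldl
          (fun (st2 : List Char × List Char) _ =>
            let x := st2.1 ++ [i]
            (x, st2.2 ++ x)) st)
      (x, y)
    = (x ++ l, y ++ prefCat x l) := by
  induction l generalizing x y with
  | nil => simp [prefCat]
  | cons c t ih =>
    rw [List.foldl_cons, ravel_inner, ih]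
    simp [prefCat]

theorem prefCat_eq_flatten (l : List Char) (x : List Char) :
    prefCat x l = ((List.range l.length).map (fun k => x ++ l.take (k + 1))).flatten := by
  induction l generalizing x with
  | nil => simp [prefCat]
  | cons c t ih =>
    rw [prefCat, ih (x ++ [c])]
    simp only [List.length_cons, List.range_succ_eq_map, List.map_cons, List.map_map,
      List.flatten_cons]
    simp [Function.comp_def, List.take_succ_cons]

theorem ravel_alt_eq (q : String) :
    ravel_alt q
      = String.ofList (((List.range q.toList.length).map (fun k => q.toList.take (k + 1))).flatten) := by
  unfold ravel_alt
  have hl : PySem.Str.len q = (q.toList.length : Int) := by simp [PySem.Str.len_eq]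
  rw [hl, PySem.List.pyRange_one]
  simp only [Int.sub_zero, Int.toNat_natCast, zero_add, List.map_map]
  congr 2
  apply List.map_congr_left
  intro k _
  simp only [Function.comp_apply]
  rw [show ((k : Int) + 1) = ((k + 1 : Nat) : Int) by push_cast; ring,
    PySem.List.slice_to_natCast]

-- ===== VERDICT (by name: the statement is the Claim_ definition above) =====
theorem ravel_spec : Claim_equal_ravel := by
  intro q _
  unfold Spec_ravel ravel
  rw [ravel_fold, ravel_alt_eq, prefCat_eq_flatten]
  simp
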